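-- pv_equiv track=rewrite | github.com/Alset-Nikolas/YandexAlgorithmTraining5 | lessons/2_LinearSearch/tasks/B_FishSeller/main.py | solution
-- ===== SOURCE A (Python) =====
-- from collections import deque
--
-- class DequeMin:
-- 	def __init__(self):
-- 		self.deq = deque()
-- 		self.deq_min = deque()
--
-- 	def add(self, x):
-- 		self.deq.append(x)
-- 		if len(self.deq_min) == 0:
-- 			self.deq_min.append(x)
-- 			return
-- 		last_item = self.deq_min.pop()
-- 		while last_item > x and len(self.deq_min) > 0:
-- 			last_item = self.deq_min.pop()
-- 		if last_item <= x:
-- 			self.deq_min.append(last_item)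
-- 		self.deq_min.append(x)
--
-- 	def pop(self):
-- 		if len(self.deq) <= 0:
-- 			raise ValueError('len <= 0')
-- 		x = self.deq.popleft()
-- 		x_min = self.deq_min.popleft()
-- 		if x != x_min:
-- 			self.deq_min.appendleft(x_min)
--
-- 	def get_min(self):
-- 		x_min = self.deq_min.popleft()
-- 		self.deq_min.appendleft(x_min)
-- 		return x_min
--
-- 	def __len__(self):
-- 		return len(self.deq)
--
-- def solution(mass, k):
-- 	q = DequeMin()
-- 	res = 0
-- 	for x in mass:
-- 		if len(q) > k:
-- 			q.pop()
-- 		q.add(x)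
-- 		x_min = q.get_min()
-- 		res = max(res, x - x_min)
-- 	return res
-- ===== SOURCE B (Python) =====
-- def solution(mass, k):
--     res = 0
--     for i, x in enumerate(mass):
--         lo = max(0, i - k)
--         res = max(res, x - min(mass[lo:i + 1]))
--     return res
-- ===== Notes on version B (the rewrite author's own statement) =====
-- stated objective: simpler
-- what changed: Replaces the hand-maintained DequeMin class (deque plus monotonic min-deque with add/pop/get_min) by a three-line loop that takes min() directly over the window slice mass[max(0,i-k):i+1].
-- outside the precondition, e.g. on solution([1, 2], -1): A raises ValueError, B raises ValueError
import Mathlib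
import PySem

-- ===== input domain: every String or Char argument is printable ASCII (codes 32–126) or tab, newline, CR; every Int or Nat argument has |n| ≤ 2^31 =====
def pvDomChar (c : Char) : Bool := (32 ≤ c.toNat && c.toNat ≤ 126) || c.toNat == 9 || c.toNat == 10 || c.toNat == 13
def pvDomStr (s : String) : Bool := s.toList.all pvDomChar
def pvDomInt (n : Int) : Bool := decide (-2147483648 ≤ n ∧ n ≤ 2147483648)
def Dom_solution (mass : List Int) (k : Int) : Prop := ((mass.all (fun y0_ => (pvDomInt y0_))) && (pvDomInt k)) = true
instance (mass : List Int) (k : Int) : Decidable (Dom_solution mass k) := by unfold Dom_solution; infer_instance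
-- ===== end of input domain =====

-- B drops A's DequeMin class and takes a direct min over the window slice mass[max(0,i-k):i+1]
-- (objective: simpler; no speed claim). Return-value equivalence on Pre_ (empty mass or k ≥ 0).

-- ===== PORT A =====
-- inner while-loop of DequeMin.add, acting on the REVERSED deq_min (Python pops from the back; head here = back)
def dmAddLoop (last : Int) (rev : List Int) (x : Int) : List Int :=
  if last > x then
    match rev with
    | [] => [x]                         -- loop exits with len == 0; last > x, so last is not re-appended
    | y :: rest => dmAddLoop y rest x
  else x :: last :: rev                 -- append last back, then append x

-- DequeMin.add acting on deq_min
def dmAdd (dmin : List Int) (x : Int) : List Int :=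
  match dmin.reverse with
  | [] => [x]
  | last :: rest => (dmAddLoop last rest x).reverse

-- DequeMin.pop acting on (deq, deq_min); the empty cases are where Python raises (excluded by Pre_ / unreachable)
def dmPop (st : List Int × List Int) : List Int × List Int :=
  match st with
  | ([], dmin) => ([], dmin)
  | (x :: d, dmin) =>
    match dmin with
    | [] => (d, [])
    | m :: ms => (d, if x = m then ms else m :: ms)

-- loop body of solution (state: deq, deq_min, res)
def stepA (k : Int) (st : List Int × List Int × Int) (x : Int) : List Int × List Int × Int :=
  let st' := if (st.1.length : Int) > k then dmPop (st.1, st.2.1) else (st.1, st.2.1)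
  let dmin := dmAdd st'.2 x
  let deq := st'.1 ++ [x]
  let xmin := dmin.headD 0              -- get_min; Python would raise on an empty deq_min, but add just ran
  (deq, dmin, max st.2.2 (x - xmin))

def solution (mass : List Int) (k : Int) : Int :=
  (mass.foldl (stepA k) ([], [], 0)).2.2

-- ===== PORT B =====
-- loop body of B: res = max(res, x - min(mass[max(0, i - k) : i + 1]))
def stepB (mass : List Int) (k : Int) (res : Int) (p : Int × Int) : Int :=
  let lo := max 0 (p.1 - k)
  match PySem.List.min? (PySem.List.slice mass (some lo) (some (p.1 + 1))) (fun y => y) with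
  | some m => max res (p.2 - m)
  | none => res                         -- min([]) raises in Python; unreachable under Pre_

def solution_alt (mass : List Int) (k : Int) : Int :=
  (PySem.List.enumerate mass).foldl (stepB mass k) 0

-- ===== PRECONDITION & SPEC =====
-- Pre_ excludes k < 0 with nonempty mass: there A raises ValueError on its first pop of the empty deque (B's min of an empty slice raises too).
def Pre_solution (mass : List Int) (k : Int) : Prop := mass = [] ∨ 0 ≤ k
instance (mass : List Int) (k : Int) : Decidable (Pre_solution mass k) := by unfold Pre_solution; infer_instance
def pvWitness_solution : List Int × Int := ([3, 1, 4, 1, 5], 2)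

def Spec_solution (mass : List Int) (k : Int) (out : Int) : Prop := out = solution_alt mass k
instance (mass : List Int) (k : Int) (out : Int) : Decidable (Spec_solution mass k out) := by unfold Spec_solution; infer_instance

-- ===== CLAIM (what is proved, stated in full; the proofs are below) =====
def Claim_equal_solution : Prop := ∀ (mass : List Int) (k : Int), Dom_solution mass k → Pre_solution mass k → Spec_solution mass k (solution mass k)

-- ===== LEMMAS AND PROOFS =====

-- the monotone min-stack of a list: an element is kept iff it is ≤ every strictly later element
def minChain : List Int → List Int
  | [] => []
  | x :: w =>
    match minChain w with
    | [] => [x]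
    | z :: zs => if x ≤ z then x :: z :: zs else z :: zs

-- the window of the last (k+1) elements of the processed prefix
def win (k : Int) (p : List Int) : List Int := p.drop (p.length - (k.toNat + 1))

theorem minChain_cons_nil (x : Int) (w : List Int) (h : minChain w = []) :
    minChain (x :: w) = [x] := by rw [minChain, h]

theorem minChain_cons_cons (x z : Int) (w zs : List Int) (h : minChain w = z :: zs) :
    minChain (x :: w) = if x ≤ z then x :: z :: zs else z :: zs := by rw [minChain, h]

theorem minChain_eq_nil_iff (l : List Int) : minChain l = [] ↔ l = [] := by
  cases l with
  | nil => simp [minChain]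
  | cons x w =>
    cases h : minChain w with
    | nil => simp [minChain_cons_nil x w h]
    | cons z zs => rw [minChain_cons_cons x z w zs h]; split_ifs <;> simp

theorem minChain_sorted (l : List Int) : (minChain l).Pairwise (· ≤ ·) := by
  induction l with
  | nil => simp [minChain]
  | cons x w ih =>
    cases h : minChain w with
    | nil => rw [minChain_cons_nil x w h]; simp
    | cons z zs =>
      rw [minChain_cons_cons x z w zs h]; rw [h] at ih
      rcases List.pairwise_cons.mp ih with ⟨hz, hzs⟩
      split_ifs with hxz
      · refine List.pairwise_cons.mpr ⟨?_, ih⟩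
        intro b hb
        rcases List.mem_cons.mp hb with rfl | hb
        · exact hxz
        · exact le_trans hxz (hz b hb)
      · exact ih

-- the head of minChain l is a minimum of l
theorem minChain_head (l : List Int) (hl : l ≠ []) :
    ∃ h s, minChain l = h :: s ∧ h ∈ l ∧ ∀ y ∈ l, h ≤ y := by
  induction l with
  | nil => exact absurd rfl hl
  | cons x w ih =>
    by_cases hw : w = []
    · subst hw
      exact ⟨x, [], minChain_cons_nil x [] rfl, List.mem_singleton_self x, by
        intro y hy; rw [List.mem_singleton] at hy; omega⟩
    · obtain ⟨h, s, hE, hmem, hle⟩ := ih hw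
      rw [minChain_cons_cons x h w s hE]
      split_ifs with hxh
      · exact ⟨x, h :: s, rfl, List.mem_cons_self, by
          intro y hy
          rcases List.mem_cons.mp hy with rfl | hy
          · exact le_refl y
          · exact le_trans hxh (hle y hy)⟩
      · exact ⟨h, s, rfl, List.mem_cons_of_mem x hmem, by
          intro y hy
          rcases List.mem_cons.mp hy with rfl | hy
          · omega
          · exact hle y hy⟩

theorem dmAddLoop_eq (rev : List Int) : ∀ (last x : Int),
    dmAddLoop last rev x = x :: List.dropWhile (fun a => decide (x < a)) (last :: rev) := by
  induction rev with
  | nil =>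
    intro last x
    by_cases h : last > x <;> simp [dmAddLoop, h]
  | cons y rest ih =>
    intro last x
    by_cases h : last > x
    · rw [dmAddLoop]
      simp only [h, if_pos]
      rw [ih y x]
      have hR : List.dropWhile (fun a => decide (x < a)) (last :: y :: rest)
          = List.dropWhile (fun a => decide (x < a)) (y :: rest) := by
        rw [List.dropWhile_cons]; simp [h]
      rw [hR]
    · rw [dmAddLoop]
      simp only [h, if_neg, not_false_iff]
      rw [List.dropWhile_cons]
      simp [h]

theorem dmAdd_eq (s : List Int) (x : Int) :
    dmAdd s x = (List.dropWhile (fun a => decide (x < a)) s.reverse).reverse ++ [x] := by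
  cases hs : s.reverse with
  | nil => simp [dmAdd, hs, List.dropWhile]
  | cons last rest =>
    simp only [dmAdd, hs]
    rw [dmAddLoop_eq rest last x, List.reverse_cons]

-- for a nondecreasing list, dropping the > x prefix of the reverse is taking the ≤ x prefix
theorem rev_dropWhile_sorted (x : Int) (s : List Int) (hs : s.Pairwise (· ≤ ·)) :
    (List.dropWhile (fun a => decide (x < a)) s.reverse).reverse
      = List.takeWhile (fun a => decide (a ≤ x)) s := by
  induction s with
  | nil => simp
  | cons a t ih =>
    rcases List.pairwise_cons.mp hs with ⟨ha, ht⟩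
    rw [List.reverse_cons, List.dropWhile_append]
    by_cases hax : a ≤ x
    · have h1 : List.dropWhile (fun a => decide (x < a)) [a] = [a] := by
        simp [not_lt.mpr hax]
      by_cases he : (List.dropWhile (fun a => decide (x < a)) t.reverse).isEmpty
      · simp only [he, if_pos, h1]
        have h2 : List.takeWhile (fun a => decide (a ≤ x)) t = [] := by
          rw [← ih ht, List.isEmpty_iff.mp he]; rfl
        simp [hax, h2]
      · simp only [he, if_neg, Bool.not_eq_true]
        rw [List.reverse_append]
        simp only [List.reverse_cons, List.reverse_nil, List.nil_append]
        rw [ih ht]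
        simp [hax]
    · have hall : ∀ b ∈ t.reverse ++ [a], (fun a => decide (x < a)) b = true := by
        intro b hb
        simp only [decide_eq_true_iff]
        rcases List.mem_append.mp hb with hb | hb
        · have := ha b (List.mem_reverse.mp hb)
          omega
        · rw [List.mem_singleton] at hb
          subst hb; omega
      have h0 : List.dropWhile (fun a => decide (x < a)) (t.reverse ++ [a]) = [] :=
        List.dropWhile_eq_nil_iff.mpr hall
      rw [← List.dropWhile_append, h0]
      simp [hax]

theorem minChain_append_singleton (l : List Int) (x : Int) :
    minChain (l ++ [x]) = List.takeWhile (fun a => decide (a ≤ x)) (minChain l) ++ [x] := by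
  induction l with
  | nil => simp [minChain]
  | cons y w ih =>
    rw [List.cons_append]
    cases hw : minChain w with
    | nil =>
      have hwnil : w = [] := (minChain_eq_nil_iff w).mp hw
      subst hwnil
      rw [minChain_cons_nil y [] rfl]
      have h1 : minChain ([x] : List Int) = [x] := by simp [minChain]
      rw [List.nil_append, minChain_cons_cons y x [x] [] h1]
      by_cases hyx : y ≤ x <;> simp [hyx]
    | cons z zs =>
      rw [hw] at ih
      rw [minChain_cons_cons y z w zs hw]
      by_cases hzx : z ≤ x
      · have hT : List.takeWhile (fun a => decide (a ≤ x)) (z :: zs)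
            = z :: List.takeWhile (fun a => decide (a ≤ x)) zs := by
          simp [hzx]
        rw [hT] at ih
        rw [minChain_cons_cons y z (w ++ [x])
          (List.takeWhile (fun a => decide (a ≤ x)) zs ++ [x]) (by rw [ih]; rfl)]
        by_cases hyz : y ≤ z
        · have hyx : y ≤ x := le_trans hyz hzx
          simp [hyz, hyx, hzx]
        · simp [hyz, hzx]
      · have hT : List.takeWhile (fun a => decide (a ≤ x)) (z :: zs) = [] := by
          simp [hzx]
        rw [hT] at ih
        simp only [List.nil_append] at ih
        rw [minChain_cons_cons y x (w ++ [x]) [] ih]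
        by_cases hyz : y ≤ z
        · rw [if_pos hyz]
          by_cases hyx : y ≤ x <;> simp [hyx, hzx]
        · rw [if_neg hyz]
          have hyx : ¬ y ≤ x := by omega
          simp [hyx, hzx]

theorem dmAdd_minChain (l : List Int) (x : Int) :
    dmAdd (minChain l) x = minChain (l ++ [x]) := by
  rw [dmAdd_eq, rev_dropWhile_sorted x (minChain l) (minChain_sorted l),
    minChain_append_singleton]

theorem dmPop_minChain (y : Int) (w : List Int) :
    dmPop (y :: w, minChain (y :: w)) = (w, minChain w) := by
  cases hw : minChain w with
  | nil =>
    have hwnil : w = [] := (minChain_eq_nil_iff w).mp hw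
    subst hwnil
    rw [minChain_cons_nil y [] rfl]
    simp [dmPop]
  | cons z zs =>
    rw [minChain_cons_cons y z w zs hw]
    by_cases hyz : y ≤ z
    · simp [hyz, dmPop]
    · have : y ≠ z := by omega
      simp [hyz, dmPop, this]

-- min? over a nonempty list equals the head of its minChain
theorem min?_eq_minChain_head (l : List Int) (hl : l ≠ []) :
    PySem.List.min? l (fun y => y) = some ((minChain l).headD 0) := by
  obtain ⟨h, s, hE, hmem, hle⟩ := minChain_head l hl
  rw [hE]
  cases hm : PySem.List.min? l (fun y => y) with
  | none => exact absurd ((PySem.List.min?_eq_none_iff l (fun y => y)).mp hm) hl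
  | some m =>
    have h1 : m ∈ l := PySem.List.min?_mem hm
    have h2 : ∀ y ∈ l, m ≤ y := PySem.List.min?_isMin hm
    have : m = h := le_antisymm (h2 h hmem) (hle m h1)
    simp [this]

-- window update: pop-if-full then append is the window of the extended prefix
theorem stepA_inv (k : Int) (hk : 0 ≤ k) (pre : List Int) (x res : Int) :
    stepA k (win k pre, minChain (win k pre), res) x
      = (win k (pre ++ [x]), minChain (win k (pre ++ [x])),
          max res (x - (minChain (win k (pre ++ [x]))).headD 0)) := by
  by_cases hn : pre.length < k.toNat + 1
  · -- window not full: no pop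
    have hwin : win k pre = pre := by
      unfold win; rw [Nat.sub_eq_zero_of_le (by omega), List.drop_zero]
    have hwin' : win k (pre ++ [x]) = pre ++ [x] := by
      unfold win
      rw [List.length_append, List.length_singleton,
        Nat.sub_eq_zero_of_le (by omega), List.drop_zero]
    have hcond : ¬ ((win k pre).length : Int) > k := by rw [hwin]; omega
    simp only [stepA]
    rw [if_neg hcond]
    dsimp only
    rw [hwin, dmAdd_minChain, hwin']
  · -- window full: pop first
    have hlen : (win k pre).length = k.toNat + 1 := by
      unfold win; rw [List.length_drop]; omega
    have hcond : ((win k pre).length : Int) > k := by rw [hlen]; omega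
    have hne : win k pre ≠ [] := by
      intro h; rw [h] at hlen; simp at hlen
    obtain ⟨y, w, hyw⟩ := List.exists_cons_of_ne_nil hne
    have hw : w = pre.drop (pre.length - k.toNat) := by
      have ht : (win k pre).tail = pre.drop (pre.length - (k.toNat + 1) + 1) := by
        unfold win; rw [List.tail_drop]
      rw [hyw] at ht
      simp only [List.tail_cons] at ht
      rw [ht]; congr 1; omega
    have hwin' : win k (pre ++ [x]) = w ++ [x] := by
      unfold win
      rw [List.length_append, List.length_singleton]
      have h1 : pre.length + 1 - (k.toNat + 1) = pre.length - k.toNat := by omega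
      rw [h1, List.drop_append_of_le_length (by omega), hw]
    simp only [stepA]
    rw [if_pos hcond, hyw, dmPop_minChain y w]
    dsimp only
    rw [dmAdd_minChain, hwin']

theorem enumerate_cons' (x : Int) (xs : List Int) (s : Int) :
    PySem.List.enumerate (x :: xs) s = (s, x) :: PySem.List.enumerate xs (s + 1) :=
  PySem.List.enumerate_cons x xs s

-- B's window slice is exactly the maintained window
theorem slice_eq_win (k : Int) (hk : 0 ≤ k) (pre rest : List Int) (x : Int) :
    PySem.List.slice (pre ++ x :: rest) (some (max 0 ((pre.length : Int) - k)))
        (some ((pre.length : Int) + 1))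
      = win k (pre ++ [x]) := by
  set i : Nat := pre.length with hi
  have hlo : (0 : Int) ≤ max 0 ((i : Int) - k) := le_max_left 0 _
  have hhi : (0 : Int) ≤ (i : Int) + 1 := by positivity
  rw [PySem.List.slice_toNat _ hlo hhi]
  have h1 : (max 0 ((i : Int) - k)).toNat = i - k.toNat := by omega
  have h2 : ((i : Int) + 1).toNat = i + 1 := by omega
  rw [h1, h2]
  have h3 : ((pre ++ x :: rest).take (i + 1)) = pre ++ [x] := by
    rw [List.take_append, List.take_of_length_le (by omega)]
    congr 1
    have : i + 1 - pre.length = 1 := by omega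
    rw [this]; rfl
  have h4 : ((pre ++ x :: rest).drop (i - k.toNat)).take (i + 1 - (i - k.toNat))
      = ((pre ++ x :: rest).take (i + 1)).drop (i - k.toNat) := by
    rw [List.drop_take]
  rw [h4, h3]
  unfold win
  rw [List.length_append, List.length_singleton]
  congr 1
  omega

theorem win_ne_nil (k : Int) (pre : List Int) (x : Int) : win k (pre ++ [x]) ≠ [] := by
  unfold win
  intro h
  rw [List.drop_eq_nil_iff] at h
  rw [List.length_append, List.length_singleton] at h
  omega

theorem auxMain (k : Int) (hk : 0 ≤ k) : ∀ (rest pre : List Int) (res : Int),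
    (rest.foldl (stepA k) (win k pre, minChain (win k pre), res)).2.2
      = (PySem.List.enumerate rest (pre.length : Int)).foldl (stepB (pre ++ rest) k) res := by
  intro rest
  induction rest with
  | nil => intro pre res; simp [PySem.List.enumerate]
  | cons x rest' ih =>
    intro pre res
    rw [List.foldl_cons, stepA_inv k hk pre x res, enumerate_cons', List.foldl_cons]
    have hB : stepB (pre ++ x :: rest') k res ((pre.length : Int), x)
        = max res (x - (minChain (win k (pre ++ [x]))).headD 0) := by
      unfold stepB
      simp only
      rw [slice_eq_win k hk pre rest' x,
        min?_eq_minChain_head _ (win_ne_nil k pre x)]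
    rw [hB]
    have hmass : pre ++ x :: rest' = (pre ++ [x]) ++ rest' := by simp
    have hlen : ((pre.length : Int) + 1) = ((pre ++ [x]).length : Int) := by
      rw [List.length_append, List.length_singleton]; push_cast; ring
    rw [hmass, hlen]
    exact ih (pre ++ [x]) (max res (x - (minChain (win k (pre ++ [x]))).headD 0))

-- ===== VERDICT (by name: the statement is the Claim_ definition above) =====
theorem solution_spec : Claim_equal_solution := by
  intro mass k _ hpre
  unfold Spec_solution
  rcases hpre with rfl | hk
  · simp [solution, solution_alt, PySem.List.enumerate]
  · have h := auxMain k hk mass [] 0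
    have hwin : win k [] = [] := by unfold win; simp
    rw [hwin] at h
    rw [show minChain [] = [] from rfl] at h
    unfold solution solution_alt
    rw [h]
    simp
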